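-- pv_equiv track=rewrite | github.com/youjeong-choi/python-coding-test | stack_250308_2.py | solution
-- ===== SOURCE A (Python) =====
-- def solution(prices):
--     # 먼저 answer를 len(prices) = n, n-1인 n개의 원소로 구성
--     n = len(prices)
--     answer = list(range(n - 1, -1, -1))
--     stack = []
--
--     # prices의 각 가격을 for문으로 반복하면서 stack에 (가격, 시점)을 append
--     # 이전 시점에 비해 떨어진 가격이 나올 시, 하나씩 시점을 뒤로 하며 떨어지지 않은 시점까지 pop() 진행.
--     # 떨어지지 않은 시점이 결정되면 answer에 해당하는 인덱스의 위치로 값을 바꾸기.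
--     for i, price in enumerate(prices):
--         while stack and stack[-1][0] > price:
--           _, t = stack.pop()
--           answer[t] = i - t
--         else:
--           stack.append((price, i))
--
--     return answer
-- ===== SOURCE B (Python) =====
-- def solution(prices):
--     n = len(prices)
--     answer = []
--     for i in range(n):
--         count = 0
--         for j in range(i + 1, n):
--             count += 1
--             if prices[j] < prices[i]:
--                 break
--         answer.append(count)
--     return answer
-- ===== Notes on version B (the rewrite author's own statement) =====
-- stated objective: simpler
-- what changed: Replaces the monotonic stack with in-place answer updates by a direct per-index forward scan that counts until the first strictly lower price.
import Mathlib
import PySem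

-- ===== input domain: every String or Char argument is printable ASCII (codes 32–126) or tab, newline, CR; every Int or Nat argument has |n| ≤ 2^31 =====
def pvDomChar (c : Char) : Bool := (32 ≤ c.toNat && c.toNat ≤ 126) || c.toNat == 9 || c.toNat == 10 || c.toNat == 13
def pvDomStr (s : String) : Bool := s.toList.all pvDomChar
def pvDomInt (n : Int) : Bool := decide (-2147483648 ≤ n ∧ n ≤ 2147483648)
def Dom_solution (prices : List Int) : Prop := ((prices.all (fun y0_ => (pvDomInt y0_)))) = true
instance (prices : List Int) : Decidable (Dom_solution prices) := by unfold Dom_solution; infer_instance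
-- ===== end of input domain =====

-- B replaces A's single-pass monotonic stack with a plain per-index forward scan (simpler, no stack state; O(n^2) instead of O(n)).

-- ===== PORT A =====
-- inner 'while stack and stack[-1][0] > price' loop: stack head = Python stack top; answer[t] = i - t
def popA (price i : Int) : List (Int × Int) → List Int → List (Int × Int) × List Int
  | [], ans => ([], ans)
  | (p, t) :: stk, ans =>
      if p > price then popA price i stk (ans.set t.toNat (i - t))
      else ((p, t) :: stk, ans)

def solution (prices : List Int) : List Int :=
  let n := prices.length
  let answer := PySem.List.pyRange ((n : Int) - 1) (-1) (-1)
  let res := (PySem.List.enumerate prices).foldl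
      (fun (st : List Int × List (Int × Int)) pr =>
        let r := popA pr.2 pr.1 st.2 st.1
        (r.2, (pr.2, pr.1) :: r.1))
      (answer, [])
  res.1

-- ===== PORT B =====
-- inner 'for j in range(i+1, n)' counting loop of B, scanning the suffix after position i
def countB (p : Int) : List Int → Int
  | [] => 0
  | x :: xs => if x < p then 1 else 1 + countB p xs

def solution_alt : List Int → List Int
  | [] => []
  | p :: rest => countB p rest :: solution_alt rest

-- ===== PRECONDITION & SPEC =====
def Spec_solution (prices : List Int) (out : List Int) : Prop := out = solution_alt prices
instance (prices : List Int) (out : List Int) : Decidable (Spec_solution prices out) := by unfold Spec_solution; infer_instance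

-- ===== CLAIM (what is proved, stated in full; the proofs are below) =====
def Claim_equal_solution : Prop := ∀ (prices : List Int), Dom_solution prices → Spec_solution prices (solution prices)

-- ===== LEMMAS AND PROOFS =====

-- index of the first strictly lower price after position t (relative to the suffix)
def firstDrop (P : List Int) (t : Nat) : Option Nat :=
  (P.drop (t+1)).findIdx? (fun v => v < P.getD t 0)

-- no later price is strictly lower than prices[t]
def noLater (P : List Int) (t : Nat) : Bool :=
  (P.drop (t+1)).all (fun v => P.getD t 0 ≤ v)

-- the answer list after processing all of P, starting from initial values a0
def ansSpec (P a0 : List Int) : List Int :=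
  a0.mapIdx (fun t v => match firstDrop P t with | some k => (k : Int) + 1 | none => v)

-- the stack after processing all of P (head = top)
def stackSpec (P : List Int) : List (Int × Int) :=
  (((List.range P.length).filter (fun t => noLater P t)).reverse).map
    (fun t => (P.getD t 0, (t : Int)))

lemma mapIdx_id' (a0 : List Int) : List.mapIdx (fun _ v => v) a0 = a0 := by
  induction a0 <;> simp_all [List.mapIdx_cons]

def stepA (st : List Int × List (Int × Int)) (pr : Int × Int) : List Int × List (Int × Int) :=
  let r := popA pr.2 pr.1 st.2 st.1
  (r.2, (pr.2, pr.1) :: r.1)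

lemma enum_append (xs : List Int) (x : Int) (s : Int) :
    PySem.List.enumerate (xs ++ [x]) s = PySem.List.enumerate xs s ++ [(s + xs.length, x)] := by
  induction xs generalizing s with
  | nil => simp [PySem.List.enumerate_nil, PySem.List.enumerate_cons]
  | cons y ys ih => simp [PySem.List.enumerate_cons, ih]; ring_nf

-- popA pops the maximal prefix of entries with price > x, updating the answer at their indices
lemma popA_eq (x i : Int) (st : List (Int × Int)) (ans : List Int) :
    popA x i st ans =
      (st.dropWhile (fun e => x < e.1),
       (st.takeWhile (fun e => x < e.1)).foldl (fun a e => a.set e.2.toNat (i - e.2)) ans) := by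
  induction st generalizing ans with
  | nil => simp [popA]
  | cons e stk ih =>
      obtain ⟨p, t⟩ := e
      by_cases h : x < p
      · simp [popA, h, List.dropWhile, List.takeWhile, ih]
      · simp [popA, h, List.dropWhile, List.takeWhile]

lemma takeWhile_eq_filter_of_pw (p : (Int × Int) → Bool) (l : List (Int × Int))
    (hpw : l.Pairwise (fun a b => p b = true → p a = true)) :
    l.takeWhile p = l.filter p ∧ l.dropWhile p = l.filter (fun e => !p e) := by
  induction l with
  | nil => simp
  | cons e tl ih =>
      rcases List.pairwise_cons.mp hpw with ⟨hh, htl⟩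
      by_cases h : p e
      · obtain ⟨h1, h2⟩ := ih htl
        simp [List.takeWhile, List.dropWhile, h, h1, h2]
      · have hall : ∀ b ∈ tl, ¬ p b = true := fun b hb hpb => h (hh b hb hpb)
        have hnil : tl.filter p = [] := List.filter_eq_nil_iff.mpr (fun a ha => by simp [hall a ha])
        have hself : tl.filter (fun e => !p e) = tl :=
          List.filter_eq_self.mpr (fun a ha => by simp [hall a ha])
        constructor
        · simp [List.takeWhile, h, hnil]
        · simp [List.dropWhile, h, hself]

lemma price_mono (P : List Int) (t t' : Nat) (h1 : t < t') (h2 : t' < P.length)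
    (h3 : noLater P t = true) : P.getD t 0 ≤ P.getD t' 0 := by
  simp only [noLater, List.all_eq_true] at h3
  have hlt : t' - (t+1) < (P.drop (t+1)).length := by simp; omega
  have hel : (P.drop (t+1))[t' - (t+1)]'hlt = P[t']'h2 := by
    rw [List.getElem_drop]; congr 1; omega
  have hm : P[t']'h2 ∈ P.drop (t+1) := hel ▸ List.getElem_mem hlt
  have h4 := h3 _ hm
  rw [List.getD_eq_getElem P 0 h2]
  exact of_decide_eq_true h4

lemma stackSpec_pairwise (P : List Int) (x : Int) :
    (stackSpec P).Pairwise
      (fun a b => (decide (x < b.1)) = true → (decide (x < a.1)) = true) := by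
  unfold stackSpec
  rw [List.pairwise_map, List.pairwise_reverse]
  have hpw : ((List.range P.length).filter (fun t => noLater P t)).Pairwise (· < ·) :=
    List.Pairwise.sublist List.filter_sublist List.pairwise_lt_range
  refine List.Pairwise.imp_of_mem ?_ hpw
  intro a b ha hb hab
  simp only [List.mem_filter, List.mem_range] at ha hb
  have := price_mono P a b hab hb.1 ha.2
  simp only [decide_eq_true_eq]
  omega

lemma noLater_iff (P : List Int) (t : Nat) :
    noLater P t = true ↔ firstDrop P t = none := by
  simp [noLater, firstDrop, List.findIdx?_eq_none_iff, Int.not_lt]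

lemma noLater_append (P : List Int) (x : Int) (t : Nat) (ht : t < P.length) :
    noLater (P ++ [x]) t = (noLater P t && decide (P.getD t 0 ≤ x)) := by
  unfold noLater
  rw [List.drop_append_of_le_length (by omega)]
  have hg : (P ++ [x])[t]?.getD 0 = P[t]?.getD 0 := by
    rw [List.getElem?_append_left ht]
  simp [List.getD, List.all_append, hg]
  rfl

lemma getD_append_self (P : List Int) (x : Int) :
    (P ++ [x]).getD P.length 0 = x := by simp [List.getD]

lemma stackSpec_append (P : List Int) (x : Int) :
    stackSpec (P ++ [x]) =
      (x, (P.length : Int)) :: (stackSpec P).filter (fun e => !(decide (x < e.1))) := by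
  unfold stackSpec
  have hlen : (P ++ [x]).length = P.length + 1 := by simp
  have hlast : noLater (P ++ [x]) P.length = true := by
    unfold noLater
    have : (P ++ [x]).drop (P.length + 1) = [] := by
      apply List.drop_eq_nil_of_le; simp
    simp [this]
  have hfilt : (List.range (P.length + 1)).filter (fun t => noLater (P ++ [x]) t) =
      (List.range P.length).filter
        (fun t => noLater P t && decide (P.getD t 0 ≤ x)) ++ [P.length] := by
    rw [List.range_succ, List.filter_append]
    congr 1
    · apply List.filter_congr
      intro t ht
      exact noLater_append P x t (List.mem_range.mp ht)
    · simp [hlast]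
  rw [hlen, hfilt]
  rw [List.reverse_append]
  simp only [List.reverse_cons, List.reverse_nil, List.nil_append, List.singleton_append,
    List.map_cons]
  congr 1
  · rw [getD_append_self]
  · rw [List.filter_map]
    have hcomp : ((List.range P.length).filter (fun t => noLater P t)).reverse.filter
        (fun t => !(decide (x < P.getD t 0))) =
        ((List.range P.length).filter
          (fun t => noLater P t && decide (P.getD t 0 ≤ x))).reverse := by
      rw [List.filter_reverse, List.filter_filter]
      congr 1
      apply List.filter_congr
      intro t _
      rw [Bool.and_comm]
      congr 1
      simp [← decide_not, Int.not_le, List.getD]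
    rw [Function.comp_def, hcomp]
    apply List.map_congr_left
    intro t ht
    simp only [List.mem_reverse, List.mem_filter, List.mem_range] at ht
    simp [List.getD, List.getElem?_append_left ht.1]

lemma foldl_set_getElem? (ts : List Nat) (f : Nat → Int) : ∀ (ans : List Int) (k : Nat),
    (ts.foldl (fun a t => a.set t (f t)) ans)[k]? =
      if k ∈ ts ∧ k < ans.length then some (f k) else ans[k]? := by
  induction ts with
  | nil => simp
  | cons t ts ih =>
      intro ans k
      rw [List.foldl_cons, ih]
      simp only [List.length_set, List.mem_cons]
      rw [List.getElem?_set]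
      by_cases h1 : k ∈ ts <;> by_cases h2 : k < ans.length <;> by_cases h3 : t = k <;>
        simp_all <;> (intro h4; omega)

lemma firstDrop_append (P : List Int) (x : Int) (k : Nat) (hk : k < P.length) :
    firstDrop (P ++ [x]) k =
      (firstDrop P k).or
        (if x < P.getD k 0 then some (P.length - (k+1)) else none) := by
  unfold firstDrop
  rw [List.drop_append_of_le_length (by omega)]
  have hg : (P ++ [x]).getD k 0 = P.getD k 0 := by
    simp [List.getD, List.getElem?_append_left hk]
  have hpred : (fun v => decide (v < (P ++ [x]).getD k 0)) =
      (fun v => decide (v < P.getD k 0)) := by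
    funext v; exact decide_eq_decide.mpr (by rw [hg])
  rw [hpred, List.findIdx?_append]
  congr 1
  by_cases h : x < P.getD k 0 <;> simp [List.findIdx?_cons, h, List.length_drop]

lemma ansSpec_length (P a0 : List Int) : (ansSpec P a0).length = a0.length := by
  simp [ansSpec]

lemma firstDrop_none_of_ge (P : List Int) (k : Nat) (hk : P.length ≤ k + 1) :
    firstDrop P k = none := by
  unfold firstDrop
  rw [List.drop_eq_nil_of_le (by omega)]
  simp

lemma ansSpec_step (P a0 : List Int) (x : Int) (h : P.length ≤ a0.length) :
    ansSpec (P ++ [x]) a0 =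
      ((stackSpec P).filter (fun e => decide (x < e.1))).foldl
        (fun a e => a.set e.2.toNat ((P.length : Int) - e.2)) (ansSpec P a0) := by
  have hstack : (stackSpec P).filter (fun e => decide (x < e.1)) =
      (((List.range P.length).filter
          (fun t => noLater P t && decide (x < P.getD t 0))).reverse).map
        (fun t => (P.getD t 0, (t : Int))) := by
    unfold stackSpec
    rw [List.filter_map, Function.comp_def, List.filter_reverse, List.filter_filter]
    congr 1
    refine congrArg List.reverse (List.filter_congr ?_)
    intro t _
    exact Bool.and_comm ..
  rw [hstack, List.foldl_map]
  have hfun : (fun (a : List Int) (t : Nat) =>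
        a.set ((t : Int)).toNat ((P.length : Int) - (t : Int))) =
      (fun (a : List Int) (t : Nat) => a.set t (((P.length : Int) - (t : Int)))) := by
    funext a t; rw [Int.toNat_natCast]
  rw [hfun]
  apply List.ext_getElem?
  intro k
  rw [foldl_set_getElem? _ (fun t => ((P.length : Int) - (t : Int)))]
  have hmem : (k ∈ ((List.range P.length).filter
      (fun t => noLater P t && decide (x < P.getD t 0))).reverse) ↔
      (k < P.length ∧ noLater P k = true ∧ x < P.getD k 0) := by
    simp [List.mem_reverse, List.mem_filter, List.mem_range, and_assoc]
  rw [ansSpec_length]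
  simp only [ansSpec, List.getElem?_mapIdx]
  by_cases hk : k < a0.length
  · by_cases hkP : k < P.length
    · by_cases hin : noLater P k = true ∧ x < P.getD k 0
      · have hfdP : firstDrop P k = none := (noLater_iff P k).mp hin.1
        have hfd : firstDrop (P ++ [x]) k = some (P.length - (k+1)) := by
          rw [firstDrop_append P x k hkP, hfdP, if_pos hin.2]; rfl
        rw [if_pos ⟨hmem.mpr ⟨hkP, hin.1, hin.2⟩, hk⟩, List.getElem?_eq_getElem hk]
        simp only [Option.map_some, hfd, Option.some.injEq]
        omega
      · have hnotin : ¬ (k ∈ ((List.range P.length).filter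
            (fun t => noLater P t && decide (x < P.getD t 0))).reverse) := by
          rw [hmem]; tauto
        rw [if_neg (by tauto)]
        cases hfdP : firstDrop P k with
        | some j =>
            have hfd : firstDrop (P ++ [x]) k = some j := by
              rw [firstDrop_append P x k hkP, hfdP]; rfl
            simp only [hfd, hfdP]
        | none =>
            have hnl : noLater P k = true := (noLater_iff P k).mpr hfdP
            have hnx : ¬ x < P.getD k 0 := fun hx => hin ⟨hnl, hx⟩
            have hfd : firstDrop (P ++ [x]) k = none := by
              rw [firstDrop_append P x k hkP, hfdP, if_neg hnx]; rfl
            simp only [hfd, hfdP]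
    · have h1 : firstDrop (P ++ [x]) k = none := by
        apply firstDrop_none_of_ge; simp; omega
      have h2 : firstDrop P k = none := firstDrop_none_of_ge P k (by omega)
      have hnotin : ¬ (k ∈ ((List.range P.length).filter
          (fun t => noLater P t && decide (x < P.getD t 0))).reverse) := by
        rw [hmem]; intro hc; omega
      rw [if_neg (by tauto)]
      simp only [h1, h2]
  · have h0 : a0[k]? = none := List.getElem?_eq_none (by omega)
    rw [if_neg (by tauto), h0]
    simp

lemma fold_inv (P : List Int) : ∀ (a0 : List Int), P.length ≤ a0.length →
    (PySem.List.enumerate P).foldl stepA (a0, []) = (ansSpec P a0, stackSpec P) := by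
  induction P using List.reverseRecOn with
  | nil =>
      intro a0 h
      simp only [PySem.List.enumerate_nil, List.foldl_nil, ansSpec, stackSpec, firstDrop,
        List.drop_nil, List.findIdx?_nil, List.length_nil, List.range_zero, List.filter_nil,
        List.reverse_nil, List.map_nil]
      rw [mapIdx_id']
  | append_singleton P x ih =>
      intro a0 h
      have hP : P.length ≤ a0.length := by simp at h; omega
      rw [enum_append, List.foldl_append, ih a0 hP]
      simp only [List.foldl_cons, List.foldl_nil, stepA]
      rw [popA_eq]
      have hpw := stackSpec_pairwise P x
      obtain ⟨ht, hd⟩ := takeWhile_eq_filter_of_pw _ _ hpw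
      rw [stackSpec_append, ansSpec_step P a0 x hP, hd]
      simp [ht]

lemma countB_eq (p : Int) (l : List Int) :
    countB p l = (match l.findIdx? (fun v => decide (v < p)) with
                  | some k => ((k : Int) + 1)
                  | none => (l.length : Int)) := by
  induction l with
  | nil => simp [countB]
  | cons y ys ih =>
      by_cases h : y < p
      · simp [countB, h, List.findIdx?_cons]
      · rw [countB, if_neg h, ih, List.findIdx?_cons, if_neg (by simp [h])]
        cases hf : ys.findIdx? (fun v => decide (v < p)) <;> simp [hf] <;> ring

lemma solution_alt_eq (P : List Int) :
    solution_alt P = (List.range P.length).map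
      (fun t => match firstDrop P t with
                | some k => (k : Int) + 1
                | none => (P.length : Int) - 1 - t) := by
  induction P with
  | nil => simp [solution_alt]
  | cons p rest ih =>
      rw [solution_alt, List.length_cons, List.range_succ_eq_map, List.map_cons, List.map_map]
      congr 1
      · rw [countB_eq]
        have hfd : firstDrop (p :: rest) 0 = rest.findIdx? (fun v => decide (v < p)) := rfl
        rw [hfd]
        cases hf : rest.findIdx? (fun v => decide (v < p)) <;> simp [hf] <;> ring
      · rw [ih]
        apply List.map_congr_left
        intro t _
        have hfd : firstDrop (p :: rest) (t + 1) = firstDrop rest t := rfl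
        simp only [Function.comp_apply, Nat.succ_eq_add_one, hfd]
        cases hf : firstDrop rest t <;> simp [hf] <;> ring

theorem solution_eq_alt (prices : List Int) : solution prices = solution_alt prices := by
  have hlen : (PySem.List.pyRange ((prices.length : Int) - 1) (-1) (-1)).length
      = prices.length := by
    rw [PySem.List.pyRange_neg_one]
    simp only [List.length_map, List.length_range]
    omega
  have h1 : solution prices =
      ((PySem.List.enumerate prices).foldl stepA
        (PySem.List.pyRange ((prices.length : Int) - 1) (-1) (-1), [])).1 := rfl
  rw [h1, fold_inv prices _ (le_of_eq hlen.symm), solution_alt_eq]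
  apply List.ext_getElem?
  intro k
  have hm : (((prices.length : Int)) - 1 - (-1)).toNat = prices.length := by omega
  rw [PySem.List.pyRange_neg_one, hm]
  simp only [ansSpec, List.getElem?_mapIdx, List.getElem?_map]
  by_cases hk : k < prices.length
  · rw [List.getElem?_range hk]
    cases hf : firstDrop prices k <;> simp [hf]
  · rw [List.getElem?_eq_none (by simpa using (by omega : prices.length ≤ k))]
    rfl

-- ===== VERDICT (by name: the statement is the Claim_ definition above) =====
theorem solution_spec : Claim_equal_solution := by
  intro prices _
  unfold Spec_solution
  exact solution_eq_alt prices
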